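-- pv_equiv track=rewrite | github.com/InfolabAI/programmers_hee | 프로그래머스/3/258709. 주사위 고르기/주사위 고르기.py | get_winrate
-- ===== SOURCE A (Python) =====
-- from itertools import product as pd
-- from collections import Counter
--
-- def get_winrate(ad, bd):
--     acases = list(map(sum, pd(*ad))) # 선택한 주사위의 경우의 수
--     bcases = list(map(sum, pd(*bd)))
--     act, bct = Counter(acases), Counter(bcases)
--     w, wl, l = 0, 0, 0
--     for sa, na in act.items():
--         for sb, nb in bct.items():
--             if sa > sb:
--                 w += (na*nb)
--             #elif sa == sb:
--             #    wl += (na*nb)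
--             #else:
--             #    l += (na*nb)
--     return w, wl, l
-- ===== SOURCE B (Python) =====
-- from bisect import bisect_left
--
-- def get_winrate(ad, bd):
--     # Build the sum distributions directly by folding one die at a time
--     # (no itertools.product tuples), then count wins by sorting B's sums
--     # once and binary-searching each A sum.
--     asums = [0]
--     for die in ad:
--         asums = [s + x for s in asums for x in die]
--     bsums = [0]
--     for die in bd:
--         bsums = [s + x for s in bsums for x in die]
--     bsorted = sorted(bsums)
--     w = 0
--     for s in asums:
--         w += bisect_left(bsorted, s)
--     return w, 0, 0
-- ===== Notes on version B (the rewrite author's own statement) =====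
-- stated objective: alternative
-- what changed: B folds the sum distribution die-by-die instead of materialising itertools.product tuples, and replaces A's double loop over two Counters with one sort of B's sums plus a binary search (bisect_left) per A sum; intended as faster (measured 5.4x at the largest size both finished, unconfirmed beyond), claimed only as alternative.
import Mathlib
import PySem

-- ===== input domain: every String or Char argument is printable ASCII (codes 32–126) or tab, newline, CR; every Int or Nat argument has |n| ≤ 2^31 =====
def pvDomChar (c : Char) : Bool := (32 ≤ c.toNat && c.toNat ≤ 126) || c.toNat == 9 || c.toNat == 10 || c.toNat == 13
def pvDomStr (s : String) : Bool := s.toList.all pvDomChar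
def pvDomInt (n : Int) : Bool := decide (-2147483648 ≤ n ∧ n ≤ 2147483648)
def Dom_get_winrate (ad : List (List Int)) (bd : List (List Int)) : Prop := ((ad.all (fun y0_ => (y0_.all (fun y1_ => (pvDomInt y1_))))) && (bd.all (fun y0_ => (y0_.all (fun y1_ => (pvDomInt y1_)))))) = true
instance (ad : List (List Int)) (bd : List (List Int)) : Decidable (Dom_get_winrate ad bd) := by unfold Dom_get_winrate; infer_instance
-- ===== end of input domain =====

-- B builds the sum lists by a direct fold and counts wins by sorting B's sums once and
-- binary-searching (bisect_left) each A sum, instead of A's Counter×Counter double loop.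

-- ===== PORT A =====
-- itertools.product(*ls): tuples in Python's order (last axis varies fastest)
def pvProduct (ls : List (List Int)) : List (List Int) :=
  ls.foldl (fun acc l => acc.flatMap (fun t => l.map (fun x => t ++ [x]))) [[]]

def get_winrate (ad : List (List Int)) (bd : List (List Int)) : List Int :=
  let acases := (pvProduct ad).map List.sum
  let bcases := (pvProduct bd).map List.sum
  let act := PySem.Dict.counter acases
  let bct := PySem.Dict.counter bcases
  let w : Int :=
    act.items.foldl (fun w p =>
      bct.items.foldl (fun w2 q =>
        if p.1 > q.1 then w2 + p.2 * q.2 else w2) w) 0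
  -- returns (w, wl, l) with wl = l = 0 (those branches are commented out in A)
  [w, 0, 0]

-- ===== PORT B =====
-- 'sums = [s + x for s in sums for x in die]' folded over the dice
def pvConvSums (dice : List (List Int)) : List Int :=
  dice.foldl (fun acc die => acc.flatMap (fun s => die.map (fun x => s + x))) [0]

def get_winrate_alt (ad : List (List Int)) (bd : List (List Int)) : List Int :=
  let asums := pvConvSums ad
  let bsorted := PySem.List.sorted (pvConvSums bd) (fun x => x) false
  let w : Int := asums.foldl (fun acc s => acc + (PySem.List.bisectLeft bsorted s : Int)) 0
  [w, 0, 0]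

-- ===== PRECONDITION & SPEC =====
def Spec_get_winrate (ad : List (List Int)) (bd : List (List Int)) (out : List Int) : Prop := out = get_winrate_alt ad bd
instance (ad : List (List Int)) (bd : List (List Int)) (out : List Int) : Decidable (Spec_get_winrate ad bd out) := by unfold Spec_get_winrate; infer_instance

-- ===== CLAIM (what is proved, stated in full; the proofs are below) =====
def Claim_equal_get_winrate : Prop := ∀ (ad : List (List Int)) (bd : List (List Int)), Dom_get_winrate ad bd → Spec_get_winrate ad bd (get_winrate ad bd)

-- ===== LEMMAS AND PROOFS =====

-- the sums of A's product tuples are exactly B's folded sums, in the same order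
theorem pvSums_aux (ls : List (List Int)) (acc : List (List Int)) :
    (ls.foldl (fun acc l => acc.flatMap (fun t => l.map (fun x => t ++ [x]))) acc).map List.sum
    = ls.foldl (fun acc die => acc.flatMap (fun s => die.map (fun x => s + x))) (acc.map List.sum) := by
  induction ls generalizing acc with
  | nil => simp
  | cons l ls ih =>
    simp only [List.foldl_cons]
    rw [ih]
    congr 1
    simp [List.map_flatMap, List.flatMap_map, Function.comp_def, List.map_map]

theorem pvSums_eq (ls : List (List Int)) : (pvProduct ls).map List.sum = pvConvSums ls := by
  simpa using pvSums_aux ls [[]]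

-- indicator sum over a nodup list containing x
theorem pvIndicator_sum (ks : List Int) (x : Int) (g : Int → Int)
    (hnd : ks.Nodup) (hx : x ∈ ks) :
    (ks.map (fun k => (if x = k then (1:Int) else 0) * g k)).sum = g x := by
  induction ks with
  | nil => simp at hx
  | cons k ks ih =>
    rw [List.nodup_cons] at hnd
    rw [List.mem_cons] at hx
    simp only [List.map_cons, List.sum_cons]
    rcases hx with h | h
    · subst h
      rw [if_pos rfl, one_mul]
      have hne : ∀ y ∈ ks, ¬ (x = y) := fun y hy he => hnd.1 (he ▸ hy)
      have hz : (ks.map (fun j => (if x = j then (1:Int) else 0) * g j)).sum = 0 := by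
        rw [List.sum_eq_zero]
        intro a ha
        obtain ⟨j, hj, rfl⟩ := List.mem_map.mp ha
        rw [if_neg (hne j hj), zero_mul]
      rw [hz]; ring
    · have hne : x ≠ k := fun he => hnd.1 (he ▸ h)
      rw [if_neg hne, zero_mul, zero_add]
      exact ih hnd.2 h

-- summing multiplicity-weighted terms over the distinct keys = summing over the list itself
theorem pvCount_sum (xs ks : List Int) (g : Int → Int)
    (hnd : ks.Nodup) (hsub : ∀ x ∈ xs, x ∈ ks) :
    (ks.map (fun k => (xs.count k : Int) * g k)).sum = (xs.map g).sum := by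
  induction xs with
  | nil => simp
  | cons x xs ih =>
    have hx : x ∈ ks := hsub x List.mem_cons_self
    have hsub' : ∀ y ∈ xs, y ∈ ks := fun y hy => hsub y (List.mem_cons_of_mem x hy)
    have hsplit : ∀ k, ((x :: xs).count k : Int) * g k
        = (xs.count k : Int) * g k + (if x = k then (1:Int) else 0) * g k := by
      intro k
      rw [List.count_cons]
      by_cases h : x = k
      · simp [h]; ring
      · simp only [if_neg h, beq_iff_eq]
        push_cast; ring
    calc (ks.map (fun k => ((x :: xs).count k : Int) * g k)).sum
        = (ks.map (fun k => (xs.count k : Int) * g k + (if x = k then (1:Int) else 0) * g k)).sum := by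
          congr 1; exact List.map_congr_left (fun k _ => hsplit k)
      _ = (ks.map (fun k => (xs.count k : Int) * g k)).sum
          + (ks.map (fun k => (if x = k then (1:Int) else 0) * g k)).sum := by
          rw [← List.sum_map_add]
      _ = (xs.map g).sum + g x := by rw [ih hsub', pvIndicator_sum ks x g hnd hx]
      _ = ((x :: xs).map g).sum := by simp [add_comm]

-- bisect_left on a sorted list counts the elements below x
theorem pvBisect_count (xs : List Int) (x : Int) (hs : xs.Pairwise (· ≤ ·)) :
    PySem.List.bisectLeft xs x = xs.countP (fun b => b < x) := by
  obtain ⟨hle, hlt, hge⟩ := PySem.List.bisectLeft_spec xs x hs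
  set k := PySem.List.bisectLeft xs x with hk
  have htd : xs = xs.take k ++ xs.drop k := (List.take_append_drop k xs).symm
  have h1 : (xs.take k).countP (fun b => b < x) = (xs.take k).length := by
    rw [List.countP_eq_length]
    intro a ha
    obtain ⟨j, hj, rfl⟩ := List.mem_iff_getElem.mp ha
    have hjk : j < k := lt_of_lt_of_le hj (by simp [List.length_take])
    have hjx : j < xs.length := lt_of_lt_of_le hjk hle
    rw [List.getElem_take]
    exact decide_eq_true (hlt j hjx hjk)
  have h2 : (xs.drop k).countP (fun b => b < x) = 0 := by
    rw [List.countP_eq_zero]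
    intro a ha
    obtain ⟨j, hj, rfl⟩ := List.mem_iff_getElem.mp ha
    rw [List.getElem_drop]
    have hjx : k + j < xs.length := by
      have := hj; rw [List.length_drop] at this; omega
    have := hge (k + j) hjx (by omega)
    simp only [decide_eq_true_eq]
    omega
  conv_rhs => rw [htd]
  rw [List.countP_append, h1, h2, List.length_take]
  omega

-- A's inner Counter loop adds na * (#b in bcases with b < sa)
theorem pvInner (bcases : List Int) (sa na w : Int) :
    (PySem.Dict.counter bcases).items.foldl
      (fun w2 q => if sa > q.1 then w2 + na * q.2 else w2) w
    = w + na * (bcases.countP (fun b => b < sa) : Int) := by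
  have hfe : (fun (w2 : Int) (q : Int × Int) => if sa > q.1 then w2 + na * q.2 else w2)
      = (fun w2 q => w2 + (if q.1 < sa then na * q.2 else 0)) := by
    funext w2 q; split_ifs with h1 <;> first | rfl | omega
  rw [hfe, PySem.List.foldl_add, PySem.Dict.items_counter, List.map_map]
  congr 1
  have hterm : ((fun (q : Int × Int) => if q.1 < sa then na * q.2 else 0) ∘
      fun k => (k, (bcases.count k : Int)))
      = fun k => (bcases.count k : Int) * (if k < sa then na else 0) := by
    funext k; simp only [Function.comp]; split_ifs <;> ring
  rw [hterm, pvCount_sum bcases (PySem.Set.ofList bcases) _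
      (PySem.Set.nodup_ofList bcases) (fun x hx => (PySem.Set.mem_ofList bcases x).mpr hx)]
  have h3 : (fun b => if b < sa then na else 0) = fun b : Int => na * (if b < sa then (1:Int) else 0) := by
    funext b; split_ifs <;> ring
  rw [h3, List.sum_map_mul_left]
  congr 1
  have h4 : (fun b : Int => if b < sa then (1:Int) else 0)
      = fun b => if (decide (b < sa)) = true then (1:Int) else 0 := by
    funext b; simp
  rw [h4, PySem.List.sum_map_ite_one_zero]

-- A's whole double loop, in closed form
theorem pvA_w (acases bcases : List Int) :
    (PySem.Dict.counter acases).items.foldl (fun w p =>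
      (PySem.Dict.counter bcases).items.foldl (fun w2 q =>
        if p.1 > q.1 then w2 + p.2 * q.2 else w2) w) 0
    = (acases.map (fun s => (bcases.countP (fun b => b < s) : Int))).sum := by
  have hfe : (fun (w : Int) (p : Int × Int) =>
      (PySem.Dict.counter bcases).items.foldl (fun w2 q =>
        if p.1 > q.1 then w2 + p.2 * q.2 else w2) w)
      = fun w p => w + p.2 * (bcases.countP (fun b => b < p.1) : Int) := by
    funext w p; exact pvInner bcases p.1 p.2 w
  rw [hfe, PySem.List.foldl_add, PySem.Dict.items_counter, List.map_map]
  have hterm : ((fun (p : Int × Int) => p.2 * (bcases.countP (fun b => b < p.1) : Int)) ∘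
      fun k => (k, (acases.count k : Int)))
      = fun k => (acases.count k : Int) * (bcases.countP (fun b => b < k) : Int) := by
    funext k; rfl
  rw [zero_add, hterm, pvCount_sum acases (PySem.Set.ofList acases) _
      (PySem.Set.nodup_ofList acases) (fun x hx => (PySem.Set.mem_ofList acases x).mpr hx)]

-- B's loop, in the same closed form
theorem pvB_w (asums bs : List Int) :
    asums.foldl (fun acc s => acc + (PySem.List.bisectLeft (PySem.List.sorted bs (fun x => x) false) s : Int)) 0
    = (asums.map (fun s => (bs.countP (fun b => b < s) : Int))).sum := by
  rw [PySem.List.foldl_add, zero_add]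
  congr 1
  apply List.map_congr_left
  intro s _
  have hsorted : (PySem.List.sorted bs (fun x => x) false).Pairwise (· ≤ ·) := by
    simpa using PySem.List.sorted_pairwise bs (fun x => x)
  rw [pvBisect_count _ s hsorted,
      (PySem.List.sorted_perm bs (fun x => x) false).countP_eq]

-- ===== VERDICT (by name: the statement is the Claim_ definition above) =====
theorem get_winrate_spec : Claim_equal_get_winrate := by
  intro ad bd _
  unfold Spec_get_winrate get_winrate get_winrate_alt
  simp only [pvSums_eq]
  rw [pvA_w, pvB_w]
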